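-- pv_equiv track=rewrite | github.com/kyucchoi/python-algorithm | level2/할인_행사/solution.py | solution_optimized
-- ===== SOURCE A (Python) =====
-- def solution_optimized(want, number, discount):
--     # 원하는 제품과 수량을 딕셔너리로 변환
--     want_count = {}
--
--     for i in range(len(want)):
--         want_count[want[i]] = number[i]
--
--     answer = 0
--
--     # 첫 번째 10일 구간의 제품 개수 세기
--     if len(discount) < 10:
--         return 0
--
--     discount_count = {}
--
--     for i in range(10):
--         product = discount[i]
--         discount_count[product] = discount_count.get(product, 0) + 1
--
--     # 첫 번째 구간 확인
--     if want_count == discount_count: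
--         answer += 1
--
--     # 슬라이딩 윈도우로 나머지 구간들 확인
--     for start_day in range(1, len(discount) - 9):
--         # 이전 구간의 첫 번째 제품 제거
--         prev_product = discount[start_day - 1]
--         discount_count[prev_product] -= 1
--
--         if discount_count[prev_product] == 0:
--             del discount_count[prev_product]
--
--         # 새 구간의 마지막 제품 추가
--         new_product = discount[start_day + 9]
--         discount_count[new_product] = discount_count.get(new_product, 0) + 1
--
--         # 현재 구간이 조건을 만족하는지 확인
--         if want_count == discount_count:
--             answer += 1
--
--     return answer
-- ===== SOURCE B (Python) =====
-- def solution_optimized(want, number, discount):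
--     # Recount each 10-day window from scratch and compare with the wanted table.
--     target = dict(zip(want, number))
--     answer = 0
--     for s in range(len(discount) - 9):
--         window_count = {}
--         for p in discount[s:s + 10]:
--             window_count[p] = window_count.get(p, 0) + 1
--         if window_count == target:
--             answer += 1
--     return answer
-- ===== Notes on version B (the rewrite author's own statement) =====
-- stated objective: simpler
-- what changed: Replaces A's incremental sliding-window dict maintenance (decrement/delete/insert per shift) by recounting each 10-day window from scratch with dict(zip(want, number)) as the target; no early return, no mutable window state.
-- outside the precondition, e.g. on solution_optimized(['a'], [], []): A raises IndexError, B returns 0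
import Mathlib
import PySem

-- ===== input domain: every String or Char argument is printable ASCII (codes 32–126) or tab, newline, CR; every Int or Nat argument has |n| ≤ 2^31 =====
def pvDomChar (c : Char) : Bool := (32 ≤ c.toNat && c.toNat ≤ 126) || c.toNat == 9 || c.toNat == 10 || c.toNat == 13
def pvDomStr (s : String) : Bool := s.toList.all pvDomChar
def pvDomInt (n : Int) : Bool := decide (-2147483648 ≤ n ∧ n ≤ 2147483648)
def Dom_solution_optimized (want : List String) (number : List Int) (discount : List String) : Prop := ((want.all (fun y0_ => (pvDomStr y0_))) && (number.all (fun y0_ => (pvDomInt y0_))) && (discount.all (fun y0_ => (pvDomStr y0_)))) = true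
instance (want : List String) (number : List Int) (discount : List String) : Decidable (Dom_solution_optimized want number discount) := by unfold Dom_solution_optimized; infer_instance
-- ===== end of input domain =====

-- B recounts each 10-day window from scratch against dict(zip(want, number));
-- A maintains one sliding-window dict incrementally.  Objective: simpler (no mutable window state).

-- ===== PORT A =====
-- Python's `d1 == d2` on dicts: order-insensitive; the keys of a dict are unique.  Exact.
def pvDictEq (d1 d2 : PySem.Dict String Int) : Bool :=
  d1.size == d2.size && d1.items.all (fun p => d2.get? p.1 == some p.2)

-- the body of A's `for start_day in range(1, len(discount) - 9)` loop; state = (answer, discount_count)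
def pvStepA (want_count : PySem.Dict String Int) (discount : List String)
    (st : Int × PySem.Dict String Int) (start_day : Int) : Int × PySem.Dict String Int :=
  let prev_product := PySem.List.pyGetD discount (start_day - 1) ""
  -- `discount_count[prev_product] -= 1`: prev_product is always a key here (it is in the current window)
  let d1 := st.2.insert prev_product (st.2.getD prev_product 0 - 1)
  let d2 := if d1.getD prev_product 0 == 0 then d1.erase prev_product else d1
  let new_product := PySem.List.pyGetD discount (start_day + 9) ""
  let d3 := d2.insert new_product (d2.getD new_product 0 + 1)
  (st.1 + (if pvDictEq want_count d3 then 1 else 0), d3)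

def solution_optimized (want : List String) (number : List Int) (discount : List String) : Int :=
  let want_count := (PySem.List.pyRange 0 (want.length : Int)).foldl
    (fun d i => d.insert (PySem.List.pyGetD want i "") (PySem.List.pyGetD number i 0))
    PySem.Dict.empty
  if (discount.length : Int) < 10 then 0
  else
    let discount_count := (PySem.List.pyRange 0 10).foldl
      (fun d i =>
        let product := PySem.List.pyGetD discount i ""
        d.insert product (d.getD product 0 + 1))
      PySem.Dict.empty
    let answer : Int := 0 + (if pvDictEq want_count discount_count then 1 else 0)
    ((PySem.List.pyRange 1 ((discount.length : Int) - 9)).foldl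
      (pvStepA want_count discount) (answer, discount_count)).1

-- ===== PORT B =====
-- the body of B's `for s in range(len(discount) - 9)` loop
def pvStepB (target : PySem.Dict String Int) (discount : List String)
    (answer : Int) (s : Int) : Int :=
  let window_count := (PySem.List.slice discount (some s) (some (s + 10))).foldl
    (fun d p => d.insert p (d.getD p 0 + 1)) PySem.Dict.empty
  answer + (if pvDictEq window_count target then 1 else 0)

def solution_optimized_alt (want : List String) (number : List Int) (discount : List String) : Int :=
  let target := PySem.Dict.ofList (want.zip number)
  (PySem.List.pyRange 0 ((discount.length : Int) - 9)).foldl (pvStepB target discount) 0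

-- ===== PRECONDITION & SPEC =====
-- Pre_ excludes exactly the inputs with fewer numbers than wanted products, on which A raises IndexError.
def Pre_solution_optimized (want : List String) (number : List Int) (discount : List String) : Prop :=
  want.length ≤ number.length
instance (want : List String) (number : List Int) (discount : List String) : Decidable (Pre_solution_optimized want number discount) := by unfold Pre_solution_optimized; infer_instance

def pvWitness_solution_optimized : List String × List Int × List String :=
  (["a"], [1], ["a", "b", "a", "c", "a", "a", "b", "a", "a", "a", "a"])

def Spec_solution_optimized (want : List String) (number : List Int) (discount : List String) (out : Int) : Prop := out = solution_optimized_alt want number discount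
instance (want : List String) (number : List Int) (discount : List String) (out : Int) : Decidable (Spec_solution_optimized want number discount out) := by unfold Spec_solution_optimized; infer_instance

-- ===== CLAIM (what is proved, stated in full; the proofs are below) =====
def Claim_equal_solution_optimized : Prop := ∀ (want : List String) (number : List Int) (discount : List String), Dom_solution_optimized want number discount → Pre_solution_optimized want number discount → Spec_solution_optimized want number discount (solution_optimized want number discount)

-- ===== LEMMAS AND PROOFS =====

-- the 10-day window starting at day s
def pvWin (l : List String) (s : Nat) : List String := (l.drop s).take 10

-- invariant tying A's incrementally maintained dict to the current window
def pvInv (d : PySem.Dict String Int) (w : List String) : Prop :=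
  d.keys.Nodup ∧ (∀ k, d.getD k 0 = (w.count k : Int)) ∧ (∀ k, d.contains k = true ↔ k ∈ w)

-- the dict part of pvStepA, isolated
def pvStep2 (d : PySem.Dict String Int) (prev np : String) : PySem.Dict String Int :=
  let d1 := d.insert prev (d.getD prev 0 - 1)
  let d2 := if d1.getD prev 0 == 0 then d1.erase prev else d1
  d2.insert np (d2.getD np 0 + 1)

-- normalized loop body that both loop bodies reduce to
def pvStepN (wc : PySem.Dict String Int) (l : List String) (ans : Int) (s : Int) : Int :=
  ans + (if pvDictEq wc (PySem.Dict.counter (pvWin l s.toNat)) then 1 else 0)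

lemma pv_get?_eq (d : PySem.Dict String Int) (k : String) :
    d.get? k = if d.contains k then some (d.getD k 0) else none := by
  rw [PySem.Dict.contains_eq_isSome_get?, PySem.Dict.getD_eq_get?_getD]
  cases d.get? k <;> simp

lemma pv_size_eq_keys_length (d : PySem.Dict String Int) : d.size = d.keys.length := by
  simp [PySem.Dict.size, PySem.Dict.keys]

lemma pvDictEq_congr_right (wc d e : PySem.Dict String Int)
    (hd : d.keys.Nodup) (he : e.keys.Nodup)
    (h : ∀ k, d.get? k = e.get? k) : pvDictEq wc d = pvDictEq wc e := by
  have hkeys : ∀ k, k ∈ d.keys ↔ k ∈ e.keys := by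
    intro k
    rw [← PySem.Dict.contains_iff_mem_keys, ← PySem.Dict.contains_iff_mem_keys,
      PySem.Dict.contains_eq_isSome_get?, PySem.Dict.contains_eq_isSome_get?, h]
  have hperm : d.keys.Perm e.keys := (List.perm_ext_iff_of_nodup hd he).mpr hkeys
  have hsize : d.size = e.size := by
    rw [pv_size_eq_keys_length, pv_size_eq_keys_length, hperm.length_eq]
  simp only [pvDictEq, hsize, h]

lemma pvDictEq_true_iff (d1 d2 : PySem.Dict String Int)
    (h1 : d1.keys.Nodup) (h2 : d2.keys.Nodup) :
    pvDictEq d1 d2 = true ↔ ∀ k, d1.get? k = d2.get? k := by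
  constructor
  · intro h
    rw [pvDictEq, Bool.and_eq_true, beq_iff_eq, List.all_eq_true] at h
    obtain ⟨hsz, hall⟩ := h
    have hsub : d1.keys ⊆ d2.keys := by
      intro k hk
      rw [← PySem.Dict.contains_iff_mem_keys, PySem.Dict.contains_eq_isSome_get?] at hk ⊢
      obtain ⟨v, hv⟩ := Option.isSome_iff_exists.mp hk
      have hm := PySem.Dict.mem_items_of_get?_eq_some d1 hv
      have h2v := hall _ hm
      rw [beq_iff_eq] at h2v
      rw [h2v]; rfl
    have hperm : d1.keys.Perm d2.keys :=
      (h1.subperm hsub).perm_of_length_le (by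
        rw [← pv_size_eq_keys_length, ← pv_size_eq_keys_length, hsz])
    intro k
    cases hk : d1.get? k with
    | some v =>
      have hm := PySem.Dict.mem_items_of_get?_eq_some d1 hk
      have h2v := hall _ hm
      rw [beq_iff_eq] at h2v
      rw [h2v]
    | none =>
      rw [PySem.Dict.get?_eq_none_iff_not_mem_keys] at hk
      have : k ∉ d2.keys := fun hmem => hk (hperm.mem_iff.mpr hmem)
      exact ((PySem.Dict.get?_eq_none_iff_not_mem_keys d2 k).mpr this).symm
  · intro h
    have hkeys : ∀ k, k ∈ d1.keys ↔ k ∈ d2.keys := by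
      intro k
      rw [← PySem.Dict.contains_iff_mem_keys, ← PySem.Dict.contains_iff_mem_keys,
        PySem.Dict.contains_eq_isSome_get?, PySem.Dict.contains_eq_isSome_get?, h]
    have hperm : d1.keys.Perm d2.keys := (List.perm_ext_iff_of_nodup h1 h2).mpr hkeys
    rw [pvDictEq, Bool.and_eq_true, beq_iff_eq, List.all_eq_true]
    refine ⟨by rw [pv_size_eq_keys_length, pv_size_eq_keys_length, hperm.length_eq], ?_⟩
    rintro ⟨k, v⟩ hm
    have := PySem.Dict.get?_of_mem_items d1 hm h1
    rw [beq_iff_eq, ← h, this]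

lemma pvDictEq_comm (d1 d2 : PySem.Dict String Int)
    (h1 : d1.keys.Nodup) (h2 : d2.keys.Nodup) :
    pvDictEq d1 d2 = pvDictEq d2 d1 := by
  rw [Bool.eq_iff_iff, pvDictEq_true_iff d1 d2 h1 h2, pvDictEq_true_iff d2 d1 h2 h1]
  exact ⟨fun h k => (h k).symm, fun h k => (h k).symm⟩

lemma pvInv_counter (w : List String) : pvInv (PySem.Dict.counter w) w := by
  refine ⟨PySem.Dict.nodup_keys_counter w, fun k => PySem.Dict.getD_counter w k, fun k => ?_⟩
  rw [PySem.Dict.contains_counter]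
  simp

lemma pvInv_get? (d : PySem.Dict String Int) (w : List String) (h : pvInv d w) (k : String) :
    d.get? k = (PySem.Dict.counter w).get? k := by
  obtain ⟨hnd, hgetD, hcont⟩ := h
  rw [pv_get?_eq, pv_get?_eq]
  have hc : d.contains k = (PySem.Dict.counter w).contains k := by
    rw [PySem.Dict.contains_counter]
    by_cases hk : k ∈ w
    · simp [(hcont k).mpr hk, hk]
    · have hdk : d.contains k = false := by
        cases hdk : d.contains k
        · rfl
        · exact absurd ((hcont k).mp hdk) hk
      simp [hdk, hk]
  rw [hc, hgetD k, PySem.Dict.getD_counter]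

lemma pv_find?_filter_ne (l : List (String × Int)) (k k' : String) (h : k' ≠ k) :
    (l.filter (fun p => !(p.1 == k))).find? (fun p => p.1 == k') = l.find? (fun p => p.1 == k') := by
  induction l with
  | nil => simp
  | cons x xs ih =>
    simp only [List.filter_cons, List.find?_cons]
    by_cases hx : x.1 = k
    · have hxk' : (k == k') = false := by
        rw [beq_eq_false_iff_ne]; exact fun hh => h hh.symm
      simp [hx, hxk', ih]
    · by_cases hk' : x.1 = k'
      · simp [hx, hk', h, List.find?_cons]
      · have hb : (x.1 == k') = false := beq_eq_false_iff_ne.mpr hk'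
        simp [hx, hb, ih, h]

lemma pv_get?_erase (d : PySem.Dict String Int) (k k' : String) :
    (d.erase k).get? k' = if k' = k then none else d.get? k' := by
  show (Option.map _ (((d.items.filter (fun p => !(p.1 == k)))).find? (fun p => p.1 == k'))) = _
  split
  · next heq =>
    subst heq
    have : (d.items.filter (fun p => !(p.1 == k'))).find? (fun p => p.1 == k') = none := by
      rw [List.find?_eq_none]
      intro x hx
      have := (List.mem_filter.mp hx).2
      simp at this
      simp [this]
    rw [this]; rfl
  · next hne =>
    rw [pv_find?_filter_ne _ _ _ hne]; rfl

lemma pv_getD_erase (d : PySem.Dict String Int) (k k' : String) (d0 : Int) :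
    (d.erase k).getD k' d0 = if k' = k then d0 else d.getD k' d0 := by
  rw [PySem.Dict.getD_eq_get?_getD, pv_get?_erase, PySem.Dict.getD_eq_get?_getD]
  split <;> rfl

lemma pv_contains_erase (d : PySem.Dict String Int) (k k' : String) :
    (d.erase k).contains k' = if k' = k then false else d.contains k' := by
  rw [PySem.Dict.contains_eq_isSome_get?, pv_get?_erase]
  split
  · rfl
  · rw [PySem.Dict.contains_eq_isSome_get?]

lemma pv_nodup_keys_erase (d : PySem.Dict String Int) (k : String) (h : d.keys.Nodup) :
    (d.erase k).keys.Nodup := by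
  have hsub : ((d.items.filter (fun p => !(p.1 == k))).map (fun x => x.1)).Sublist
      (d.items.map (fun x => x.1)) := (List.filter_sublist).map _
  exact h.sublist hsub

lemma pv_win_cons (l : List String) (a : Nat) (h10 : a + 10 < l.length) :
    pvWin l a = l.getD a "" :: (l.drop (a + 1)).take 9 := by
  have ha : a < l.length := by omega
  rw [pvWin, List.drop_eq_getElem_cons ha, List.getD_eq_getElem l "" ha]
  rfl

lemma pv_win_snoc (l : List String) (a : Nat) (h10 : a + 10 < l.length) :
    pvWin l (a + 1) = (l.drop (a + 1)).take 9 ++ [l.getD (a + 10) ""] := by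
  have hlen : 9 < (l.drop (a + 1)).length := by
    rw [List.length_drop]; omega
  have h10' : a + 10 < l.length := h10
  rw [pvWin, show (10 : Nat) = 9 + 1 from rfl, List.take_succ]
  congr 1
  rw [List.getElem?_eq_getElem hlen]
  simp only [List.getElem_drop, Option.toList_some]
  rw [List.getD_eq_getElem l "" (by omega : a + 10 < l.length)]

lemma pv_step_inv (l : List String) (a : Nat) (h10 : a + 10 < l.length)
    (d : PySem.Dict String Int) (h : pvInv d (pvWin l a)) :
    pvInv (pvStep2 d (l.getD a "") (l.getD (a + 10) "")) (pvWin l (a + 1)) := by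
  obtain ⟨hnd, hgetD, hcont⟩ := h
  set prev := l.getD a "" with hprev
  set np := l.getD (a + 10) "" with hnp
  set mid := (l.drop (a + 1)).take 9 with hmid
  have hw : pvWin l a = prev :: mid := pv_win_cons l a h10
  have hw' : pvWin l (a + 1) = mid ++ [np] := pv_win_snoc l a h10
  rw [hw] at hgetD hcont
  rw [hw']
  have hdprev : d.getD prev 0 = (mid.count prev : Int) + 1 := by
    have hc : (prev :: mid).count prev = mid.count prev + 1 := by simp [List.count_cons]
    rw [hgetD prev, hc]; push_cast; omega
  have hdother : ∀ k, k ≠ prev → d.getD k 0 = (mid.count k : Int) := by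
    intro k hk
    have hc : (prev :: mid).count k = mid.count k := by
      simp [List.count_cons, Ne.symm hk]
    rw [hgetD k, hc]
  have hcont' : ∀ k, d.contains k = true ↔ (k = prev ∨ k ∈ mid) := by
    intro k; rw [hcont k]; simp
  rw [pvStep2]
  set d1 := d.insert prev (d.getD prev 0 - 1) with hd1
  have hd1getD : ∀ k, d1.getD k 0 = if k = prev then (mid.count prev : Int) else (mid.count k : Int) := by
    intro k
    rw [hd1, PySem.Dict.getD_insert]
    by_cases hk : k = prev
    · subst hk; simp [hdprev]
    · simp only [if_neg hk]; exact hdother k hk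
  have hd1cont : ∀ k, d1.contains k = true ↔ (k = prev ∨ k ∈ mid) := by
    intro k
    rw [hd1, PySem.Dict.contains_insert, Bool.or_eq_true, beq_iff_eq, hcont']
    tauto
  have hd1nd : d1.keys.Nodup := PySem.Dict.nodup_keys_insert _ _ _ hnd
  set d2 := if d1.getD prev 0 == 0 then d1.erase prev else d1 with hd2
  have hprevcase : (d1.getD prev 0 == 0) = true ↔ prev ∉ mid := by
    rw [beq_iff_eq, hd1getD prev, if_pos rfl]
    constructor
    · intro hz
      have : mid.count prev = 0 := by exact_mod_cast hz
      exact List.count_eq_zero.mp this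
    · intro hm
      rw [List.count_eq_zero_of_not_mem hm]; rfl
  have hd2getD : ∀ k, d2.getD k 0 = (mid.count k : Int) := by
    intro k
    rw [hd2]
    by_cases hz : (d1.getD prev 0 == 0) = true
    · rw [if_pos hz, pv_getD_erase]
      by_cases hk : k = prev
      · rw [if_pos hk, hk, List.count_eq_zero_of_not_mem (hprevcase.mp hz)]; rfl
      · rw [if_neg hk, hd1getD k, if_neg hk]
    · rw [if_neg hz, hd1getD k]
      by_cases hk : k = prev
      · rw [if_pos hk, hk]
      · rw [if_neg hk]
  have hd2cont : ∀ k, d2.contains k = true ↔ k ∈ mid := by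
    intro k
    rw [hd2]
    by_cases hz : (d1.getD prev 0 == 0) = true
    · have hpm : prev ∉ mid := hprevcase.mp hz
      rw [if_pos hz, pv_contains_erase]
      by_cases hk : k = prev
      · rw [if_pos hk]
        simp [hk, hpm]
      · rw [if_neg hk, hd1cont k]
        constructor
        · rintro (rfl | hm)
          · exact absurd rfl hk
          · exact hm
        · exact Or.inr
    · have hpm : prev ∈ mid := by
        by_contra hnm
        exact hz (hprevcase.mpr hnm)
      rw [if_neg hz, hd1cont k]
      constructor
      · rintro (rfl | hm)
        · exact hpm
        · exact hm
      · exact Or.inr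
  have hd2nd : d2.keys.Nodup := by
    rw [hd2]
    by_cases hz : (d1.getD prev 0 == 0) = true
    · rw [if_pos hz]; exact pv_nodup_keys_erase _ _ hd1nd
    · rw [if_neg hz]; exact hd1nd
  refine ⟨PySem.Dict.nodup_keys_insert _ _ _ hd2nd, fun k => ?_, fun k => ?_⟩
  · rw [PySem.Dict.getD_insert, List.count_append]
    by_cases hk : k = np
    · rw [if_pos hk, hd2getD np, hk]
      have hone : ([np].count np) = 1 := by simp
      rw [hone]; push_cast; ring
    · rw [if_neg hk, hd2getD k]
      have hzero : ([np].count k) = 0 := by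
        rw [List.count_eq_zero]; simp [hk]
      rw [hzero]
      push_cast; ring
  · rw [PySem.Dict.contains_insert, Bool.or_eq_true, beq_iff_eq, hd2cont k]
    simp [or_comm]

lemma pvMatch (wc d : PySem.Dict String Int) (w : List String) (h : pvInv d w) :
    pvDictEq wc d = pvDictEq wc (PySem.Dict.counter w) :=
  pvDictEq_congr_right wc d _ h.1 (PySem.Dict.nodup_keys_counter w) (pvInv_get? d w h)

lemma pv_stepA_eq (wc : PySem.Dict String Int) (l : List String) (a : Nat)
    (st : Int × PySem.Dict String Int) :
    pvStepA wc l st ((a : Int) + 1)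
      = (st.1 + (if pvDictEq wc (pvStep2 st.2 (l.getD a "") (l.getD (a + 10) "")) then 1 else 0),
         pvStep2 st.2 (l.getD a "") (l.getD (a + 10) "")) := by
  have h1 : ((a : Int) + 1) - 1 = (a : Int) := by ring
  have h2 : ((a : Int) + 1) + 9 = ((a + 10 : Nat) : Int) := by push_cast; ring
  rw [pvStepA, pvStep2, h1, h2, PySem.List.pyGetD_natCast, PySem.List.pyGetD_natCast]

lemma pv_loop (wc : PySem.Dict String Int) (l : List String) (m : Nat) :
    ∀ (a : Nat) (d : PySem.Dict String Int) (ans : Int),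
      pvInv d (pvWin l a) → a + 10 + m ≤ l.length →
      ((PySem.List.pyRange ((a : Int) + 1) ((a : Int) + 1 + (m : Int))).foldl (pvStepA wc l) (ans, d)).1
        = (PySem.List.pyRange ((a : Int) + 1) ((a : Int) + 1 + (m : Int))).foldl (pvStepN wc l) ans := by
  induction m with
  | zero =>
    intro a d ans _ _
    rw [PySem.List.pyRange_one_eq_nil (by simp)]
    rfl
  | succ m ih =>
    intro a d ans hInv hlen
    have hlt : (a : Int) + 1 < (a : Int) + 1 + ((m : Nat) + 1 : Nat) := by push_cast; omega
    rw [PySem.List.pyRange_one_cons hlt]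
    simp only [List.foldl_cons]
    have h10 : a + 10 < l.length := by omega
    have hInv' := pv_step_inv l a h10 d hInv
    rw [pv_stepA_eq wc l a (ans, d)]
    have hmatch : pvDictEq wc (pvStep2 d (l.getD a "") (l.getD (a + 10) ""))
        = pvDictEq wc (PySem.Dict.counter (pvWin l (a + 1))) :=
      pvMatch wc _ _ hInv'
    have hstepN : pvStepN wc l ans ((a : Int) + 1)
        = ans + (if pvDictEq wc (PySem.Dict.counter (pvWin l (a + 1))) then 1 else 0) := by
      rw [pvStepN]
      norm_num
    have hrange : PySem.List.pyRange ((a : Int) + 1 + 1) ((a : Int) + 1 + ((m + 1 : Nat) : Int))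
        = PySem.List.pyRange (((a + 1 : Nat) : Int) + 1) (((a + 1 : Nat) : Int) + 1 + (m : Int)) := by
      congr 1 <;> push_cast <;> ring
    rw [hrange]
    rw [ih (a + 1) _ _ hInv' (by omega)]
    rw [hstepN, hmatch]

lemma pv_range_fold_take {β : Type} (l : List String) (dflt : String) (f : β → String → β)
    (b : β) (m : Nat) (hm : m ≤ l.length) :
    (PySem.List.pyRange 0 (m : Int)).foldl (fun acc i => f acc (PySem.List.pyGetD l i dflt)) b
      = (l.take m).foldl f b := by
  induction m with
  | zero =>
    rw [PySem.List.pyRange_one_eq_nil (by simp)]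
    rfl
  | succ m ih =>
    have hm' : m ≤ l.length := by omega
    have hcast : ((m + 1 : Nat) : Int) = (m : Int) + 1 := by push_cast; ring
    rw [hcast, PySem.List.pyRange_one_succ_right (by positivity), List.foldl_append,
      ih hm', List.take_succ, List.foldl_append,
      List.getElem?_eq_getElem (by omega : m < l.length)]
    simp only [List.foldl_cons, List.foldl_nil, Option.toList_some]
    rw [PySem.List.pyGetD_natCast, List.getD_eq_getElem l dflt (by omega : m < l.length)]

lemma pv_wantcount (want : List String) (number : List Int) (hlen : want.length ≤ number.length)
    (m : Nat) (hm : m ≤ want.length) (d0 : PySem.Dict String Int) :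
    (PySem.List.pyRange 0 (m : Int)).foldl
        (fun d i => d.insert (PySem.List.pyGetD want i "") (PySem.List.pyGetD number i 0)) d0
      = ((want.zip number).take m).foldl (fun d p => d.insert p.1 p.2) d0 := by
  induction m with
  | zero =>
    rw [PySem.List.pyRange_one_eq_nil (by simp)]
    rfl
  | succ m ih =>
    have hm' : m ≤ want.length := by omega
    have hmz : m < (want.zip number).length := by
      rw [List.length_zip]; omega
    have hcast : ((m + 1 : Nat) : Int) = (m : Int) + 1 := by push_cast; ring
    rw [hcast, PySem.List.pyRange_one_succ_right (by positivity), List.foldl_append,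
      ih hm', List.take_succ, List.foldl_append,
      List.getElem?_eq_getElem hmz]
    simp only [List.foldl_cons, List.foldl_nil, Option.toList_some, List.getElem_zip]
    rw [PySem.List.pyGetD_natCast, PySem.List.pyGetD_natCast,
      List.getD_eq_getElem want "" (by omega : m < want.length),
      List.getD_eq_getElem number 0 (by omega : m < number.length)]

theorem pv_main (want : List String) (number : List Int) (discount : List String)
    (hpre : want.length ≤ number.length) :
    solution_optimized want number discount = solution_optimized_alt want number discount := by
  rw [solution_optimized, solution_optimized_alt]
  -- A's want_count is B's target
  have hzlen : (want.zip number).length = want.length := by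
    rw [List.length_zip]; omega
  have hwc : (PySem.List.pyRange 0 (want.length : Int)).foldl
      (fun d i => d.insert (PySem.List.pyGetD want i "") (PySem.List.pyGetD number i 0))
      PySem.Dict.empty = PySem.Dict.ofList (want.zip number) := by
    rw [pv_wantcount want number hpre want.length (le_refl _) PySem.Dict.empty,
      List.take_of_length_le (by omega)]
    rfl
  rw [hwc]
  set target := PySem.Dict.ofList (want.zip number) with htarget
  have htargetnd : target.keys.Nodup := PySem.Dict.nodup_keys_ofList _
  -- normalize B's loop body
  have hB : (PySem.List.pyRange 0 ((discount.length : Int) - 9)).foldl (pvStepB target discount) 0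
      = (PySem.List.pyRange 0 ((discount.length : Int) - 9)).foldl (pvStepN target discount) 0 := by
    apply PySem.List.foldl_congr_mem
    intro acc s hs
    have hs0 : 0 ≤ s := (PySem.List.mem_pyRange_one.mp hs).1
    have hsn : s = ((s.toNat : Nat) : Int) := (Int.toNat_of_nonneg hs0).symm
    rw [pvStepB, pvStepN]
    have hslice : PySem.List.slice discount (some s) (some (s + 10))
        = pvWin discount s.toNat := by
      rw [hsn, show (((s.toNat : Nat) : Int) + 10) = ((s.toNat : Nat) : Int) + ((10 : Nat) : Int) by norm_num,
        PySem.List.slice_natCast_add]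
      rfl
    rw [hslice, PySem.Dict.foldl_insert_getD_add_one_eq_counter,
      pvDictEq_comm _ _ (PySem.Dict.nodup_keys_counter _) htargetnd]
  rw [hB]
  by_cases hlt : (discount.length : Int) < 10
  · rw [if_pos hlt, PySem.List.pyRange_one_eq_nil (by omega)]
    rfl
  · rw [if_neg hlt]
    have h10 : 10 ≤ discount.length := by omega
    -- A's first window dict is the counter of window 0
    have hdc : (PySem.List.pyRange 0 10).foldl
        (fun d i =>
          let product := PySem.List.pyGetD discount i ""
          d.insert product (d.getD product 0 + 1))
        PySem.Dict.empty = PySem.Dict.counter (pvWin discount 0) := by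
      have hw0 : pvWin discount 0 = discount.take 10 := by rw [pvWin, List.drop_zero]
      rw [show (10 : Int) = ((10 : Nat) : Int) by norm_num]
      exact (pv_range_fold_take discount "" (fun (d : PySem.Dict String Int) x => d.insert x (d.getD x 0 + 1))
          PySem.Dict.empty 10 h10).trans
        ((PySem.Dict.foldl_insert_getD_add_one_eq_counter _).trans
          (congrArg PySem.Dict.counter hw0.symm))
    rw [hdc]
    -- peel the first iteration off B's loop
    rw [PySem.List.pyRange_one_cons (by omega : (0 : Int) < (discount.length : Int) - 9)]
    simp only [List.foldl_cons]
    have hstep0 : pvStepN target discount 0 0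
        = 0 + (if pvDictEq target (PySem.Dict.counter (pvWin discount 0)) then 1 else 0) := by
      rw [pvStepN]; norm_num
    rw [hstep0]
    -- the main loop
    have e1 : (((0 : Nat) : Int) + 1) = 1 := by norm_num
    have e2 : ((1 : Int) + (((discount.length - 10 : Nat)) : Int)) = (discount.length : Int) - 9 := by
      rw [Nat.cast_sub h10]; push_cast; ring
    have hrange : PySem.List.pyRange 1 ((discount.length : Int) - 9)
        = PySem.List.pyRange (((0 : Nat) : Int) + 1) (((0 : Nat) : Int) + 1 + (((discount.length - 10 : Nat)) : Int)) := by
      rw [e1, e2]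
    rw [hrange, pv_loop target discount (discount.length - 10) 0 _ _
      (by rw [pvWin, List.drop_zero]; exact pvInv_counter _) (by omega),
      show ((0 : Int) + 1) = 1 by norm_num, hrange]


-- ===== VERDICT (by name: the statement is the Claim_ definition above) =====
theorem solution_optimized_spec : Claim_equal_solution_optimized := by
  intro want number discount _ hpre
  unfold Spec_solution_optimized
  exact pv_main want number discount hpre
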